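-- pv_equiv track=rewrite | github.com/wulinlw/leetcode_cn | leetcode-vscode/914.卡牌分组.py | hasGroupsSizeX2
-- ===== SOURCE A (Python) =====
-- from typing import List
--
-- def hasGroupsSizeX2(deck: List[int]) -> bool:
--     import collections
--     if len(deck)<=1:return False
--     c = collections.Counter(deck)                   #每个数字计数
--     for x in range(2, len(deck)+1):                 #从2开始
--         if len(deck)%x==0:                          #长度能整除才有机会true
--             if all(i % x == 0 for i in c.values()): #所有数字个数都能被x整除，就可以分组完成
--                 return True
--     return False
-- ===== SOURCE B (Python) =====
-- def hasGroupsSizeX2(deck):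
--     import collections
--     g = 0
--     for v in collections.Counter(deck).values():
--         while v:
--             g, v = v, g % v
--     return g >= 2
-- ===== Notes on version B (the rewrite author's own statement) =====
-- stated objective: alternative
-- what changed: A tries every candidate group size x from 2 to len(deck), checking divisibility of every count for each x; B instead folds an inline Euclid gcd over the counts in one pass and returns gcd >= 2.
import Mathlib
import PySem

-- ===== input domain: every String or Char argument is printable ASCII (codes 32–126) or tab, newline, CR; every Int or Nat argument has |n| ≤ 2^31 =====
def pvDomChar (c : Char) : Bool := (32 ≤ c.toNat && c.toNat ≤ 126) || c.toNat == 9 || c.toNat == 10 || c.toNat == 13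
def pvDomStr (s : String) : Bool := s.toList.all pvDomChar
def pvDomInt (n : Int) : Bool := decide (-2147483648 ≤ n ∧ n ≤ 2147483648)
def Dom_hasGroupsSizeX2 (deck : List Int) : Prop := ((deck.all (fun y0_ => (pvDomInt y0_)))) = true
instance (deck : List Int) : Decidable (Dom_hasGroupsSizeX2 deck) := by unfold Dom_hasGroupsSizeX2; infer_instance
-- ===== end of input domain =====

-- B replaces A's trial-division scan over all candidate group sizes by a single
-- gcd fold over the multiset counts (objective: alternative algorithm).

-- ===== PORT A =====
-- the 'for x in range(2, len(deck)+1)' loop with its early 'return True'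
def pvLoopA (n : Int) (vals : List Int) : List Int → Bool
  | [] => false
  | x :: rest =>
    if PySem.Int.mod n x = 0 then
      if vals.all (fun i => PySem.Int.mod i x == 0) then true
      else pvLoopA n vals rest
    else pvLoopA n vals rest

def hasGroupsSizeX2 (deck : List Int) : Bool :=
  if deck.length ≤ 1 then false
  else
    let c := PySem.Dict.counter deck
    pvLoopA (deck.length : Int) c.values (PySem.List.pyRange 2 ((deck.length : Int) + 1) 1)

-- ===== PORT B =====
-- the inline Euclid loop 'while v: g, v = v, g % v' of Source B
theorem pvModAbsLt (g v : Int) (h : ¬ v = 0) : (PySem.Int.mod g v).natAbs < v.natAbs := by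
  rcases lt_or_gt_of_ne h with hv | hv
  · have := PySem.Int.mod_neg_bounds (a := g) hv; omega
  · have h1 := PySem.Int.mod_nonneg (a := g) hv
    have h2 := PySem.Int.mod_lt (a := g) hv; omega

def pvEuclid (g v : Int) : Int :=
  if h : v = 0 then g else pvEuclid v (PySem.Int.mod g v)
termination_by v.natAbs
decreasing_by exact pvModAbsLt g v h

def hasGroupsSizeX2_alt (deck : List Int) : Bool :=
  decide (2 ≤ (PySem.Dict.counter deck).values.foldl (fun g v => pvEuclid g v) 0)

-- ===== PRECONDITION & SPEC =====
def Spec_hasGroupsSizeX2 (deck : List Int) (out : Bool) : Prop := out = hasGroupsSizeX2_alt deck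
instance (deck : List Int) (out : Bool) : Decidable (Spec_hasGroupsSizeX2 deck out) := by unfold Spec_hasGroupsSizeX2; infer_instance

-- ===== CLAIM (what is proved, stated in full; the proofs are below) =====
def Claim_equal_hasGroupsSizeX2 : Prop := ∀ (deck : List Int), Dom_hasGroupsSizeX2 deck → Spec_hasGroupsSizeX2 deck (hasGroupsSizeX2 deck)

-- ===== LEMMAS AND PROOFS =====

-- A's loop is an existential over the range list
theorem pvLoopA_eq_any (n : Int) (vals : List Int) (l : List Int) :
    pvLoopA n vals l =
      l.any (fun x => decide (PySem.Int.mod n x = 0) &&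
        vals.all (fun i => PySem.Int.mod i x == 0)) := by
  induction l with
  | nil => rfl
  | cons x rest ih =>
    simp only [pvLoopA, List.any_cons, ih]
    by_cases h1 : PySem.Int.mod n x = 0 <;>
      by_cases h2 : vals.all (fun i => PySem.Int.mod i x == 0) = true <;>
        simp [h1, h2]

-- Euclid on nonnegative inputs is Nat.gcd (strong induction on |v|)
theorem pvEuclid_eq_gcd_aux : ∀ (n : Nat) (g v : Int), v.natAbs ≤ n → 0 ≤ g → 0 ≤ v →
    pvEuclid g v = ((Nat.gcd v.toNat g.toNat : Nat) : Int) := by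
  intro n
  induction n with
  | zero =>
    intro g v hle hg hv
    have hv0 : v = 0 := by omega
    rw [pvEuclid, hv0]
    simp [Int.toNat_of_nonneg hg]
  | succ n ih =>
    intro g v hle hg hv
    rw [pvEuclid]
    split_ifs with h
    · rw [h]; simp [Int.toNat_of_nonneg hg]
    · have hvpos : 0 < v := lt_of_le_of_ne hv (Ne.symm h)
      have hm0 : 0 ≤ PySem.Int.mod g v := PySem.Int.mod_nonneg g hvpos
      have habs := pvModAbsLt g v h
      rw [ih v (PySem.Int.mod g v) (by omega) hv hm0]
      congr 1
      have hmod : (PySem.Int.mod g v).toNat = g.toNat % v.toNat := by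
        rw [PySem.Int.mod_eq_emod_of_pos (a := g) hvpos]
        have h2 : g % v = ((g.toNat % v.toNat : Nat) : Int) := by
          push_cast [Int.toNat_of_nonneg hg, Int.toNat_of_nonneg hvpos.le]; rfl
        omega
      rw [hmod]
      exact (Nat.gcd_rec v.toNat g.toNat).symm

theorem pvEuclid_eq_gcd (g v : Int) (hg : 0 ≤ g) (hv : 0 ≤ v) :
    pvEuclid g v = ((Nat.gcd v.toNat g.toNat : Nat) : Int) :=
  pvEuclid_eq_gcd_aux v.natAbs g v le_rfl hg hv

-- fold of Euclid over a list of nonnegative ints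
theorem pvFold_eq_gcdFold (l : List Int) : ∀ (a : Int), 0 ≤ a → (∀ x ∈ l, 0 ≤ x) →
    l.foldl (fun g v => pvEuclid g v) a =
      ((l.foldl (fun g v => Nat.gcd v.toNat g) a.toNat : Nat) : Int) := by
  induction l with
  | nil => intro a ha _; simp [Int.toNat_of_nonneg ha]
  | cons v rest ih =>
    intro a ha hl
    simp only [List.foldl_cons]
    rw [pvEuclid_eq_gcd a v ha (hl v (by simp))]
    rw [ih _ (Int.natCast_nonneg _) (fun x hx => hl x (by simp [hx]))]
    simp

def pvGcdFold (a : Nat) (cnts : List Nat) : Nat := cnts.foldl (fun g c => Nat.gcd c g) a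

theorem pvGcdFold_dvd_init (cnts : List Nat) : ∀ (a : Nat), pvGcdFold a cnts ∣ a := by
  induction cnts with
  | nil => intro a; exact dvd_refl a
  | cons c rest ih =>
    intro a
    exact (ih (Nat.gcd c a)).trans (Nat.gcd_dvd_right c a)

theorem pvGcdFold_dvd_mem (cnts : List Nat) : ∀ (a x : Nat), x ∈ cnts → pvGcdFold a cnts ∣ x := by
  induction cnts with
  | nil => intro a x hx; cases hx
  | cons c rest ih =>
    intro a x hx
    rcases List.mem_cons.mp hx with hx | hx
    · subst hx
      exact (pvGcdFold_dvd_init rest _).trans (Nat.gcd_dvd_left x a)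
    · exact ih _ x hx

theorem pvDvd_gcdFold (cnts : List Nat) : ∀ (a d : Nat), d ∣ a → (∀ x ∈ cnts, d ∣ x) →
    d ∣ pvGcdFold a cnts := by
  induction cnts with
  | nil => intro a d ha _; exact ha
  | cons c rest ih =>
    intro a d ha h
    exact ih _ d (Nat.dvd_gcd (h c (by simp)) ha) (fun x hx => h x (by simp [hx]))

-- counter values as counts over the distinct elements
theorem pvValues_counter (deck : List Int) :
    (PySem.Dict.counter deck).values =
      (PySem.Set.ofList deck).map (fun k => (deck.count k : Int)) := by
  simp [PySem.Dict.values, PySem.Dict.items_counter, List.map_map]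

-- sum of the counts over the distinct elements is the length
theorem pvSum_counts (deck : List Int) :
    ((PySem.Set.ofList deck).map (fun k => deck.count k)).sum = deck.length := by
  have hperm : (PySem.Set.ofList deck).Perm deck.dedup := by
    rw [List.perm_ext_iff_of_nodup (PySem.Set.nodup_ofList deck) deck.nodup_dedup]
    intro a
    rw [PySem.Set.mem_ofList, List.mem_dedup]
  rw [(hperm.map (fun k => deck.count k)).sum_eq]
  exact List.sum_map_count_dedup_eq_length deck

-- B returns true iff the gcd of the counts is at least 2
theorem pvB_iff (deck : List Int) :
    hasGroupsSizeX2_alt deck = true ↔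
      2 ≤ pvGcdFold 0 ((PySem.Set.ofList deck).map (fun k => deck.count k)) := by
  unfold hasGroupsSizeX2_alt
  rw [pvValues_counter]
  rw [pvFold_eq_gcdFold _ 0 le_rfl (by
    intro x hx
    obtain ⟨k, _, rfl⟩ := List.mem_map.mp hx
    exact Int.natCast_nonneg _)]
  rw [decide_eq_true_iff]
  have h : ((PySem.Set.ofList deck).map (fun k => (deck.count k : Int))).foldl
      (fun g v => Nat.gcd v.toNat g) (0 : Int).toNat =
      pvGcdFold 0 ((PySem.Set.ofList deck).map (fun k => deck.count k)) := by
    unfold pvGcdFold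
    rw [List.foldl_map, List.foldl_map]
    simp
  rw [h]
  exact_mod_cast Iff.rfl

-- A returns true iff some x in [2, n] divides n and every count
theorem pvA_iff (deck : List Int) :
    hasGroupsSizeX2 deck = true ↔
      (¬ deck.length ≤ 1 ∧ ∃ x : Int, 2 ≤ x ∧ x < (deck.length : Int) + 1 ∧
        x ∣ (deck.length : Int) ∧
        ∀ c ∈ (PySem.Set.ofList deck).map (fun k => deck.count k), x ∣ (c : Int)) := by
  unfold hasGroupsSizeX2
  split_ifs with h1
  · simp [h1]
  · simp only [h1, not_false_iff, true_and]
    rw [pvLoopA_eq_any, List.any_eq_true]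
    constructor
    · rintro ⟨x, hmem, hx⟩
      rw [PySem.List.mem_pyRange_one] at hmem
      simp only [Bool.and_eq_true, decide_eq_true_iff, List.all_eq_true, beq_iff_eq] at hx
      refine ⟨x, hmem.1, hmem.2, (PySem.Int.mod_eq_zero_iff_dvd _ _).mp hx.1, ?_⟩
      intro c hc
      obtain ⟨k, hk, rfl⟩ := List.mem_map.mp hc
      have := hx.2 _ (by rw [pvValues_counter]; exact List.mem_map.mpr ⟨k, hk, rfl⟩)
      exact (PySem.Int.mod_eq_zero_iff_dvd _ _).mp this
    · rintro ⟨x, hx2, hxlt, hxn, hall⟩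
      refine ⟨x, PySem.List.mem_pyRange_one.mpr ⟨hx2, hxlt⟩, ?_⟩
      simp only [Bool.and_eq_true, decide_eq_true_iff, List.all_eq_true, beq_iff_eq]
      refine ⟨(PySem.Int.mod_eq_zero_iff_dvd _ _).mpr hxn, ?_⟩
      intro i hi
      rw [pvValues_counter] at hi
      simp only [List.mem_map] at hi
      obtain ⟨k, hk, rfl⟩ := hi
      exact (PySem.Int.mod_eq_zero_iff_dvd _ _).mpr
        (hall _ (List.mem_map.mpr ⟨k, hk, rfl⟩))

-- ===== VERDICT (by name: the statement is the Claim_ definition above) =====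
theorem hasGroupsSizeX2_spec : Claim_equal_hasGroupsSizeX2 := by
  intro deck _
  unfold Spec_hasGroupsSizeX2
  rw [Bool.eq_iff_iff, pvA_iff, pvB_iff]
  set cnts := (PySem.Set.ofList deck).map (fun k => deck.count k) with hcnts
  constructor
  · rintro ⟨hlen, x, hx2, _, _, hall⟩
    have hx0 : 0 ≤ x := by omega
    have hd2 : 2 ≤ x.toNat := by omega
    have hdvdG : x.toNat ∣ pvGcdFold 0 cnts := by
      refine pvDvd_gcdFold cnts 0 x.toNat (dvd_zero _) ?_
      intro c hc
      have hxc := hall c hc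
      rw [show x = ((x.toNat : Nat) : Int) by omega] at hxc
      exact_mod_cast hxc
    have hdeckne : deck ≠ [] := by
      intro h; rw [h] at hlen; simp at hlen
    obtain ⟨k, hk⟩ := List.exists_mem_of_ne_nil deck hdeckne
    have hkc : deck.count k ∈ cnts :=
      List.mem_map.mpr ⟨k, (PySem.Set.mem_ofList deck k).mpr hk, rfl⟩
    have hGc := pvGcdFold_dvd_mem cnts 0 _ hkc
    have hcpos : 0 < deck.count k := List.count_pos_iff.mpr hk
    have hGpos : 0 < pvGcdFold 0 cnts := by
      rcases Nat.eq_zero_or_pos (pvGcdFold 0 cnts) with h0 | h0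
      · rw [h0] at hGc; omega
      · exact h0
    exact le_trans hd2 (Nat.le_of_dvd hGpos hdvdG)
  · intro hG
    have hsum : cnts.sum = deck.length := pvSum_counts deck
    have hGn : pvGcdFold 0 cnts ∣ deck.length := by
      rw [← hsum]
      exact List.dvd_sum (fun c hc => pvGcdFold_dvd_mem cnts 0 c hc)
    have hnne : deck.length ≠ 0 := by
      intro h0
      have hnil : deck = [] := List.length_eq_zero_iff.mp h0
      have hcnil : cnts = [] := by rw [hcnts, hnil]; rfl
      rw [hcnil] at hG
      simp [pvGcdFold] at hG
    have hGle : pvGcdFold 0 cnts ≤ deck.length :=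
      Nat.le_of_dvd (Nat.pos_of_ne_zero hnne) hGn
    refine ⟨by omega, ((pvGcdFold 0 cnts : Nat) : Int), by exact_mod_cast hG,
      by exact_mod_cast (by omega : pvGcdFold 0 cnts < deck.length + 1),
      by exact_mod_cast hGn, ?_⟩
    intro c hc
    exact_mod_cast pvGcdFold_dvd_mem cnts 0 c hc
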